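-- pv_equiv track=rewrite | github.com/kevScheuer/neutralb1 | src/neutralb1/analysis/statistics.py | _same_coherent_sum_key
-- ===== SOURCE A (Python) =====
-- def _same_coherent_sum_key(var1: str, var2: str, coh_sums: dict) -> bool:
--     """Check if var1 and var2 belong to the same coherent sum group.
--
--     Args:
--         var1 (str): First variable name.
--         var2 (str): Second variable name.
--         coh_sums (dict): Dictionary of coherent sums.
--
--     Returns:
--         True if both variables belong to the same coherent sum group or are not coherent
--             sums, False otherwise.
--     """
--
--     all_values = sum(coh_sums.values(), [])  # get combined list of coh sums
--
--     # make sure var1 and var2 are coherent sums first, since the loop only checks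
--     # within coherent sum groups
--     if var1 not in all_values or var2 not in all_values:
--         return True
--
--     for key, vals in coh_sums.items():
--         if var1 in vals and var2 in vals:
--             return True
--     return False
-- ===== SOURCE B (Python) =====
-- def _same_coherent_sum_key(var1: str, var2: str, coh_sums: dict) -> bool:
--     """One pass over the groups: track whether each variable appears anywhere
--     and whether some single group contains both; no concatenated list is built."""
--     seen1 = seen2 = together = False
--     for vals in coh_sums.values():
--         in1 = var1 in vals
--         in2 = var2 in vals
--         seen1 = seen1 or in1
--         seen2 = seen2 or in2
--         together = together or (in1 and in2)
--     return (not seen1) or (not seen2) or together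
-- ===== Notes on version B (the rewrite author's own statement) =====
-- stated objective: faster
-- what changed: Single fold over the groups tracking (var1 seen, var2 seen, some group holds both), replacing A's quadratic sum(values, []) concatenation plus two membership scans and a second loop.
import Mathlib
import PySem

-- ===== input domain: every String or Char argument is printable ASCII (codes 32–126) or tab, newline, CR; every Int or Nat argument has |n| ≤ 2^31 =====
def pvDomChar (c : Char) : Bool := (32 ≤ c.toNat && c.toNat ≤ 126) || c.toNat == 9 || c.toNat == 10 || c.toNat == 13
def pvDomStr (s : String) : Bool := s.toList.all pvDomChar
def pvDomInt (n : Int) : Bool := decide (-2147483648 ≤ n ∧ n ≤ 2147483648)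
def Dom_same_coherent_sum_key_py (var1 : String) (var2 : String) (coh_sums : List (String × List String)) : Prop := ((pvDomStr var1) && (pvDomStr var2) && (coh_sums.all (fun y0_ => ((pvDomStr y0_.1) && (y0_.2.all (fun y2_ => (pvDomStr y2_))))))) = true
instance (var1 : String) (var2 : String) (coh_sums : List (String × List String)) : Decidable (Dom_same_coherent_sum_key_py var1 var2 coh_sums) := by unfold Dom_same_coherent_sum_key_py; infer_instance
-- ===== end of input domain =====

-- B replaces A's quadratic sum(values, []) + second loop by one fold over the groups; timing objective: faster.
-- ===== PORT A =====
-- the 'for key, vals in coh_sums.items(): if var1 in vals and var2 in vals: return True / return False' loop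
def pvLoopA (var1 : String) (var2 : String) : List (String × List String) → Bool
  | [] => false
  | kv :: rest => if kv.2.contains var1 && kv.2.contains var2 then true else pvLoopA var1 var2 rest

def same_coherent_sum_key_py (var1 : String) (var2 : String) (coh_sums : List (String × List String)) : Bool :=
  let all_values := coh_sums.foldl (fun acc kv => acc ++ kv.2) []   -- sum(coh_sums.values(), [])
  if !(all_values.contains var1) || !(all_values.contains var2) then true
  else pvLoopA var1 var2 coh_sums

-- ===== PORT B =====
def same_coherent_sum_key_py_alt (var1 : String) (var2 : String) (coh_sums : List (String × List String)) : Bool :=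
  let st := coh_sums.foldl
    (fun (st : Bool × Bool × Bool) kv =>
      let in1 := kv.2.contains var1
      let in2 := kv.2.contains var2
      (st.1 || in1, st.2.1 || in2, st.2.2 || (in1 && in2)))
    (false, false, false)
  !st.1 || !st.2.1 || st.2.2

-- ===== PRECONDITION & SPEC =====
def Spec_same_coherent_sum_key_py (var1 : String) (var2 : String) (coh_sums : List (String × List String)) (out : Bool) : Prop := out = same_coherent_sum_key_py_alt var1 var2 coh_sums
instance (var1 : String) (var2 : String) (coh_sums : List (String × List String)) (out : Bool) : Decidable (Spec_same_coherent_sum_key_py var1 var2 coh_sums out) := by unfold Spec_same_coherent_sum_key_py; infer_instance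

-- ===== CLAIM (what is proved, stated in full; the proofs are below) =====
def Claim_equal_same_coherent_sum_key_py : Prop := ∀ (var1 : String) (var2 : String) (coh_sums : List (String × List String)), Dom_same_coherent_sum_key_py var1 var2 coh_sums → Spec_same_coherent_sum_key_py var1 var2 coh_sums (same_coherent_sum_key_py var1 var2 coh_sums)

-- ===== LEMMAS AND PROOFS =====

-- B's fold state, characterised in closed form.
theorem pv_fold_char (var1 var2 : String) (l : List (String × List String)) (a b c : Bool) :
    l.foldl
      (fun (st : Bool × Bool × Bool) kv =>
        let in1 := kv.2.contains var1
        let in2 := kv.2.contains var2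
        (st.1 || in1, st.2.1 || in2, st.2.2 || (in1 && in2)))
      (a, b, c)
    = (a || l.any (fun kv => kv.2.contains var1),
       b || l.any (fun kv => kv.2.contains var2),
       c || l.any (fun kv => kv.2.contains var1 && kv.2.contains var2)) := by
  induction l generalizing a b c with
  | nil => simp
  | cons kv rest ih => rw [List.foldl_cons, ih]; simp [Bool.or_assoc]

-- A's concatenation, characterised: membership in sum(values, []).
theorem pv_concat_contains (v : String) (l : List (String × List String)) (acc : List String) :
    (l.foldl (fun acc kv => acc ++ kv.2) acc).contains v
      = (acc.contains v || l.any (fun kv => kv.2.contains v)) := by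
  induction l generalizing acc with
  | nil => simp
  | cons kv rest ih => rw [List.foldl_cons, ih]; simp [Bool.or_assoc]

theorem pv_loopA_eq_any (var1 var2 : String) (l : List (String × List String)) :
    pvLoopA var1 var2 l = l.any (fun kv => kv.2.contains var1 && kv.2.contains var2) := by
  induction l with
  | nil => rfl
  | cons kv rest ih =>
    cases h : (kv.2.contains var1 && kv.2.contains var2) <;> simp [pvLoopA, h, ih]

-- ===== VERDICT (by name: the statement is the Claim_ definition above) =====
theorem same_coherent_sum_key_py_spec : Claim_equal_same_coherent_sum_key_py := by
  intro var1 var2 coh_sums _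
  show same_coherent_sum_key_py var1 var2 coh_sums = same_coherent_sum_key_py_alt var1 var2 coh_sums
  simp only [same_coherent_sum_key_py, same_coherent_sum_key_py_alt, pv_fold_char,
    pv_concat_contains, pv_loopA_eq_any, List.contains_nil, Bool.false_or]
  cases h1 : coh_sums.any (fun kv => kv.2.contains var1) <;>
  cases h2 : coh_sums.any (fun kv => kv.2.contains var2) <;>
    simp [h1, h2]
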